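-- pv_equiv track=rewrite | github.com/Hydrocide/SudokuSolver | testgrounds.py | _makecol
-- ===== SOURCE A (Python) =====
-- def _makecol(intlist: list[int]) -> list[list[str]]:
--     """
--     Make Col Matrix\n
--     Take in a list of integers and return a list containing a list of columns\n
--         * intlist - list of integers to be converted into list of rows
--     """
--     sidesize = int(len(intlist)**0.5)
--     #return [[intlist[j] for j in range(i, len(intlist), sidesize)] for i in range(sidesize)] #single line
--     out: list = []
--     for i in range(sidesize):
--         tempout: list = []
--         for j in range(i, len(intlist), sidesize):
--             tempout.append(intlist[j])
--         out.append(tempout)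
--     return out
-- ===== SOURCE B (Python) =====
-- def _makecol(intlist: list[int]) -> list[list[str]]:
--     """Single forward pass: distribute each element to out[index % sidesize]."""
--     sidesize = int(len(intlist)**0.5)
--     out = [[] for _ in range(sidesize)]
--     for idx, v in enumerate(intlist):
--         out[idx % sidesize].append(v)
--     return out
-- ===== Notes on version B (the rewrite author's own statement) =====
-- stated objective: alternative
-- what changed: Replaced the nested strided gathers (one inner loop per column) by a single forward pass with enumerate that appends each element to bucket idx % sidesize.
import Mathlib
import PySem

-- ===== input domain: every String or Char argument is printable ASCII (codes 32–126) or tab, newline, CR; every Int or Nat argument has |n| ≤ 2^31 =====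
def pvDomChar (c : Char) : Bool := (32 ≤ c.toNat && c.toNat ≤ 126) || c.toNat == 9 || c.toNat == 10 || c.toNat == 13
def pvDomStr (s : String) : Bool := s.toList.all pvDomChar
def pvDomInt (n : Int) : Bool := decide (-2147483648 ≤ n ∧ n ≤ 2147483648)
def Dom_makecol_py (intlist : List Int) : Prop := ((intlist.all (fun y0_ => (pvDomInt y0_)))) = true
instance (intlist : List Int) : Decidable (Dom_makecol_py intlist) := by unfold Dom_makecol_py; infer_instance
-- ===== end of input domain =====

-- B replaces A's nested strided column gathers by a single forward pass that appends each
-- element to bucket (index % sidesize) — a different decomposition, same O(n) cost.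

-- ===== PORT A =====
-- int(len(intlist)**0.5) is ported as Nat.sqrt: exact on lengths in the tested regime
-- (far below where float sqrt misrounds a floor).
def makecol_py (intlist : List Int) : List (List Int) :=
  (PySem.List.pyRange 0 (Nat.sqrt intlist.length : Int) 1).foldl
    (fun out i =>
      out ++ [(PySem.List.pyRange i (intlist.length : Int) (Nat.sqrt intlist.length : Int)).foldl
        (fun tempout j => tempout ++ [PySem.List.pyGetD intlist j 0]) []])
    []

-- ===== PORT B =====
def makecol_py_alt (intlist : List Int) : List (List Int) :=
  (PySem.List.enumerate intlist).foldl
    (fun out p => out.modify (PySem.Int.mod p.1 (Nat.sqrt intlist.length : Int)).toNat (· ++ [p.2]))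
    (List.replicate (Nat.sqrt intlist.length) [])

-- ===== PRECONDITION & SPEC =====
def Spec_makecol_py (intlist : List Int) (out : List (List Int)) : Prop := out = makecol_py_alt intlist
instance (intlist : List Int) (out : List (List Int)) : Decidable (Spec_makecol_py intlist out) := by unfold Spec_makecol_py; infer_instance

-- ===== CLAIM (what is proved, stated in full; the proofs are below) =====
def Claim_equal_makecol_py : Prop := ∀ (intlist : List Int), Dom_makecol_py intlist → Spec_makecol_py intlist (makecol_py intlist)

-- ===== LEMMAS AND PROOFS =====

-- number of indices i, i+s, i+2s, … below n
def pvCnt (n s i : Nat) : Nat := if i < n then (n - i + s - 1) / s else 0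

-- the arithmetic progression i, i+s, …
def pvProg (i c s : Nat) : List Nat := (List.range c).map (fun k => i + s * k)

lemma pvCnt_bracket {n s i k : Nat} (hs : 0 < s) (hin : i < n) :
    k < pvCnt n s i ↔ i + s * k < n := by
  unfold pvCnt
  rw [if_pos hin]
  constructor
  · intro h
    have h' : k + 1 ≤ (n - i + s - 1) / s := h
    rw [Nat.le_div_iff_mul_le hs] at h'
    have : (k + 1) * s = s * k + s := by ring
    omega
  · intro h
    have h' : (k + 1) * s ≤ n - i + s - 1 := by
      have : (k + 1) * s = s * k + s := by ring
      omega
    have := (Nat.le_div_iff_mul_le hs).mpr h'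
    omega

-- A's inner range, as a Nat list: range(i, n, s) = the progression of length pvCnt n s i
lemma filter_range_mod (n s i : Nat) (hs : 0 < s) (hi : i < s) :
    (List.range n).filter (fun j => j % s == i) = pvProg i (pvCnt n s i) s := by
  refine List.Perm.eq_of_pairwise (le := (· < ·)) (fun a b _ _ h1 h2 => by omega)
    ((List.pairwise_lt_range).filter _)
    (List.Pairwise.map _ (fun a b hab => by
      have := (Nat.mul_lt_mul_left hs).mpr hab; omega) List.pairwise_lt_range) ?_
  rw [List.perm_ext_iff_of_nodup]
  · intro j
    simp only [List.mem_filter, List.mem_range, pvProg, List.mem_map, beq_iff_eq]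
    constructor
    · rintro ⟨hjn, hmod⟩
      have hij : i ≤ j := by rw [← hmod]; exact Nat.mod_le j s
      have hin : i < n := lt_of_le_of_lt hij hjn
      obtain ⟨k, rfl⟩ : ∃ k, j = i + s * k := by
        refine ⟨j / s, ?_⟩
        have h := Nat.div_add_mod j s
        rw [hmod] at h
        linarith
      have hlt : i + s * k < n := hjn
      exact ⟨k, (pvCnt_bracket hs hin).mpr hlt, rfl⟩
    · rintro ⟨k, hk, rfl⟩
      have hin : i < n := by
        by_contra hcon
        unfold pvCnt at hk
        rw [if_neg (by omega)] at hk
        omega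
      refine ⟨(pvCnt_bracket hs hin).mp hk, ?_⟩
      rw [Nat.add_mul_mod_self_left]
      exact Nat.mod_eq_of_lt hi
  · exact List.nodup_range.filter _
  · refine (List.nodup_range (n := pvCnt n s i)).map ?_
    intro a b hab
    have h1 := Nat.add_left_cancel hab
    exact Nat.eq_of_mul_eq_mul_left hs h1

-- the cast-level count in pyRange_of_pos equals pvCnt
lemma count_cast (n s i : Nat) (hs : 0 < s) :
    (if (i : Int) < (n : Int) then (((n : Int) - i + s - 1) / s).toNat else 0) = pvCnt n s i := by
  unfold pvCnt
  by_cases h : i < n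
  · rw [if_pos (by exact_mod_cast h), if_pos h]
    have h1 : (n : Int) - i + s - 1 = ((n - i + s - 1 : Nat) : Int) := by omega
    rw [h1, ← Int.natCast_div, Int.toNat_natCast]
  · rw [if_neg (by exact_mod_cast h), if_neg h]

-- A in normal form: the i-th column is the strided progression, read through getD
lemma A_norm (xs : List Int) :
    makecol_py xs =
      (List.range (Nat.sqrt xs.length)).map
        (fun i => (pvProg i (pvCnt xs.length (Nat.sqrt xs.length) i) (Nat.sqrt xs.length)).map
          (fun j => xs.getD j 0)) := by
  by_cases hnil : xs = []
  · subst hnil; rfl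
  · have hs : 0 < Nat.sqrt xs.length := by
      have : 0 < xs.length := List.length_pos_iff.mpr hnil
      exact Nat.sqrt_pos.mpr this
    unfold makecol_py
    rw [PySem.List.pyRange_zero_nat,
        PySem.List.foldl_append_singleton_eq_map, List.nil_append, List.map_map]
    apply List.map_congr_left
    intro i _
    simp only [Function.comp]
    rw [PySem.List.foldl_append_singleton_eq_map, List.nil_append,
        PySem.List.pyRange_of_pos _ _ (by exact_mod_cast hs),
        count_cast _ _ _ hs]
    unfold pvProg
    rw [List.map_map, List.map_map]
    apply List.map_congr_left
    intro k _
    simp only [Function.comp]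
    have h1 : (i : Int) + (Nat.sqrt xs.length : Int) * k = ((i + Nat.sqrt xs.length * k : Nat) : Int) := by
      push_cast; ring
    rw [h1, PySem.List.pyGetD_natCast]

-- B's fold invariant: after the whole pass, bucket i holds exactly the elements whose
-- index is ≡ i (mod s), in order
lemma B_inv (s : Nat) (ys : List Int) :
    (PySem.List.enumerate ys).foldl
        (fun out p => out.modify (PySem.Int.mod p.1 (s : Int)).toNat (· ++ [p.2]))
        (List.replicate s [])
      = (List.range s).map
          (fun i => ((List.range ys.length).filter (fun j => j % s == i)).map
            (fun j => ys.getD j 0)) := by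
  induction ys using List.reverseRecOn with
  | nil =>
      simp [PySem.List.enumerate_nil, List.map_const']
  | append_singleton ys x ih =>
      rw [PySem.List.enumerate_append, List.foldl_append, ih]
      have hstep : PySem.List.enumerate [x] (0 + (ys.length : Int)) = [((ys.length : Int), x)] := by
        rw [PySem.List.enumerate_cons, PySem.List.enumerate_nil]
        norm_num
      rw [hstep]
      simp only [List.foldl_cons, List.foldl_nil]
      rw [PySem.Int.mod_natCast, Int.toNat_natCast]
      apply List.ext_getElem
      · simp [List.length_modify]
      · intro t h1 h2
        rw [List.getElem_modify]
        simp only [List.getElem_map, List.getElem_range]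
        have ht : t < s := by simpa using h2
        have hlen : (ys ++ [x]).length = ys.length + 1 := by simp
        rw [hlen, List.range_succ, List.filter_append, List.map_append]
        have hgetold : ∀ j ∈ (List.range ys.length).filter (fun j => j % s == t),
            (ys ++ [x]).getD j 0 = ys.getD j 0 := by
          intro j hj
          have hj' : j < ys.length := by
            have := List.mem_range.mp (List.mem_filter.mp hj).1; exact this
          simp [List.getD, List.getElem?_append_left hj']
        by_cases hc : ys.length % s = t
        · rw [if_pos hc]
          have hfil : (List.filter (fun j => j % s == t) [ys.length]) = [ys.length] := by
            simp [hc]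
          rw [hfil]
          simp only [List.map_cons, List.map_nil]
          congr 1
          · exact List.map_congr_left (fun j hj => (hgetold j hj).symm)
          · simp [List.getD]
        · rw [if_neg hc]
          have hfil : (List.filter (fun j => j % s == t) [ys.length]) = [] := by
            simp [hc]
          rw [hfil]
          simp only [List.map_nil, List.append_nil]
          exact List.map_congr_left (fun j hj => (hgetold j hj).symm)

-- ===== VERDICT (by name: the statement is the Claim_ definition above) =====
theorem makecol_py_spec : Claim_equal_makecol_py := by
  intro xs _
  unfold Spec_makecol_py
  by_cases hnil : xs = []
  · subst hnil; rfl
  · have hs : 0 < Nat.sqrt xs.length :=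
      Nat.sqrt_pos.mpr (List.length_pos_iff.mpr hnil)
    rw [A_norm]
    unfold makecol_py_alt
    rw [B_inv]
    apply List.map_congr_left
    intro i hi
    rw [filter_range_mod _ _ _ hs (List.mem_range.mp hi)]
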